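-- pv_equiv track=rewrite | github.com/vincentscode/Praktikum-Hochschule-Trier | temp_v/test6.py | split_dict_at_gaps
-- ===== SOURCE A (Python) =====
-- from operator import itemgetter
--
-- def split_dict_at_gaps(input, min_gap_size, key):
-- 	input = sorted(input, key=itemgetter(key))
-- 	groups = []
-- 	for i in range(len(input)):
-- 		if groups:
-- 			x = input[i][key]
-- 			if abs(groups[-1][-1][key] - x) < min_gap_size:
-- 				groups[-1].append(input[i])
-- 			else:
-- 				groups.append([input[i]])
-- 		else:
-- 			groups.append([input[i]])
-- 	return groups
-- ===== SOURCE B (Python) =====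
-- from operator import itemgetter
--
-- def split_dict_at_gaps(input, min_gap_size, key):
--     items = sorted(input, key=itemgetter(key))
--     if not items:
--         return []
--     breaks = [i + 1 for i in range(len(items) - 1)
--               if abs(items[i][key] - items[i + 1][key]) >= min_gap_size]
--     bounds = [0] + breaks + [len(items)]
--     return [items[a:b] for a, b in zip(bounds, bounds[1:])]
-- ===== Notes on version B (the rewrite author's own statement) =====
-- stated objective: alternative
-- what changed: Replaces the incremental append-to-last-group loop with a two-phase strategy: compute the break indices where adjacent sorted values gap apart, then cut the sorted list into slices at those bounds.
import Mathlib
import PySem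

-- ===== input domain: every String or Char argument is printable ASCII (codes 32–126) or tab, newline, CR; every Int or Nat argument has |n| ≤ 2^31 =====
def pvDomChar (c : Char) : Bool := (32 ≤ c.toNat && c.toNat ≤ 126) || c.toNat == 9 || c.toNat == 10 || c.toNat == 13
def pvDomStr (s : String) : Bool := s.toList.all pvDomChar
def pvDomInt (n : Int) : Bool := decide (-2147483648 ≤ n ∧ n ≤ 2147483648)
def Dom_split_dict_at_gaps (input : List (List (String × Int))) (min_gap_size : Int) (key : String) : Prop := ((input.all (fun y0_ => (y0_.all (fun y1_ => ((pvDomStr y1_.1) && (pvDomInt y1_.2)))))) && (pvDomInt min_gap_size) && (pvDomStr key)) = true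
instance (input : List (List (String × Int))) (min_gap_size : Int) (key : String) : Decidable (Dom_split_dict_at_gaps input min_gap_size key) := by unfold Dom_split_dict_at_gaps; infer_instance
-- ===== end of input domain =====

-- B replaces A's incremental append-to-last-group loop by computing the gap break indices and
-- slicing the sorted list at them (alternative decomposition; same asymptotic cost).

-- ===== PORT A =====
-- d[key] for an association-list dict (first match, like a Python dict); exact under Pre_ (key present)
def pvKeyVal (key : String) (d : List (String × Int)) : Int := (List.lookup key d).getD 0

def split_dict_at_gaps (input : List (List (String × Int))) (min_gap_size : Int) (key : String) : List (List (List (String × Int))) :=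
  let inp := PySem.List.sorted input (fun d => pvKeyVal key d) false
  (PySem.List.pyRange 0 (inp.length : Int) 1).foldl
    (fun groups i =>
      if groups ≠ [] then
        if |pvKeyVal key (PySem.List.pyGetD (PySem.List.pyGetD groups (-1) []) (-1) []) -
            pvKeyVal key (PySem.List.pyGetD inp i [])| < min_gap_size then
          groups.dropLast ++ [PySem.List.pyGetD groups (-1) [] ++ [PySem.List.pyGetD inp i []]]
        else
          groups ++ [[PySem.List.pyGetD inp i []]]
      else
        groups ++ [[PySem.List.pyGetD inp i []]]) []

-- ===== PORT B =====
def split_dict_at_gaps_alt (input : List (List (String × Int))) (min_gap_size : Int) (key : String) : List (List (List (String × Int))) :=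
  let items := PySem.List.sorted input (fun d => pvKeyVal key d) false
  if items = [] then []
  else
    let breaks := ((PySem.List.pyRange 0 ((items.length : Int) - 1) 1).filter
        (fun i => decide (|pvKeyVal key (PySem.List.pyGetD items i []) -
                   pvKeyVal key (PySem.List.pyGetD items (i + 1) [])| ≥ min_gap_size))).map (· + 1)
    let bounds := [(0 : Int)] ++ breaks ++ [(items.length : Int)]
    (bounds.zip (PySem.List.slice bounds (some 1) none)).map
      (fun p => PySem.List.slice items (some p.1) (some p.2))

-- ===== PRECONDITION & SPEC =====
-- Pre_ excludes exactly the inputs where Python raises KeyError: some dict lacks `key`.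
def Pre_split_dict_at_gaps (input : List (List (String × Int))) (min_gap_size : Int) (key : String) : Prop :=
  ∀ d ∈ input, (List.lookup key d).isSome = true
instance (input : List (List (String × Int))) (min_gap_size : Int) (key : String) : Decidable (Pre_split_dict_at_gaps input min_gap_size key) := by unfold Pre_split_dict_at_gaps; infer_instance
def pvWitness_split_dict_at_gaps : (List (List (String × Int))) × Int × String := ([[("a", 1)], [("a", 5)]], 3, "a")

def Spec_split_dict_at_gaps (input : List (List (String × Int))) (min_gap_size : Int) (key : String) (out : List (List (List (String × Int)))) : Prop := out = split_dict_at_gaps_alt input min_gap_size key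
instance (input : List (List (String × Int))) (min_gap_size : Int) (key : String) (out : List (List (List (String × Int)))) : Decidable (Spec_split_dict_at_gaps input min_gap_size key out) := by unfold Spec_split_dict_at_gaps; infer_instance

-- ===== CLAIM (what is proved, stated in full; the proofs are below) =====
def Claim_equal_split_dict_at_gaps : Prop := ∀ (input : List (List (String × Int))) (min_gap_size : Int) (key : String), Dom_split_dict_at_gaps input min_gap_size key → Pre_split_dict_at_gaps input min_gap_size key → Spec_split_dict_at_gaps input min_gap_size key (split_dict_at_gaps input min_gap_size key)

-- ===== LEMMAS AND PROOFS =====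

-- A's loop body as a named step function (definitionally the lambda in the port of A)
def pvStep (g : Int) (key : String) (groups : List (List (List (String × Int)))) (e : List (String × Int)) : List (List (List (String × Int))) :=
  if groups ≠ [] then
    if |pvKeyVal key (PySem.List.pyGetD (PySem.List.pyGetD groups (-1) []) (-1) []) -
        pvKeyVal key e| < g then
      groups.dropLast ++ [PySem.List.pyGetD groups (-1) [] ++ [e]]
    else
      groups ++ [[e]]
  else
    groups ++ [[e]]

-- B's break/bounds/slice pipeline on an arbitrary list (definitionally the core of B's port)
def pvBreaks (g : Int) (key : String) (ys : List (List (String × Int))) : List Int :=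
  ((PySem.List.pyRange 0 ((ys.length : Int) - 1) 1).filter
      (fun i => decide (|pvKeyVal key (PySem.List.pyGetD ys i []) -
                 pvKeyVal key (PySem.List.pyGetD ys (i + 1) [])| ≥ g))).map (· + 1)

def pvBounds (g : Int) (key : String) (ys : List (List (String × Int))) : List Int :=
  [(0 : Int)] ++ pvBreaks g key ys ++ [(ys.length : Int)]

def pvCore (g : Int) (key : String) (ys : List (List (String × Int))) : List (List (List (String × Int))) :=
  if ys = [] then []
  else ((pvBounds g key ys).zip (PySem.List.slice (pvBounds g key ys) (some 1) none)).map
      (fun p => PySem.List.slice ys (some p.1) (some p.2))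

lemma pvAlt_eq_core (input : List (List (String × Int))) (g : Int) (key : String) :
    split_dict_at_gaps_alt input g key = pvCore g key (PySem.List.sorted input (fun d => pvKeyVal key d) false) := rfl

lemma pvA_eq_foldl (input : List (List (String × Int))) (g : Int) (key : String) :
    split_dict_at_gaps input g key =
      (PySem.List.sorted input (fun d => pvKeyVal key d) false).foldl (pvStep g key) [] := by
  unfold split_dict_at_gaps
  show (PySem.List.pyRange 0 ((PySem.List.sorted input (fun d => pvKeyVal key d) false).length : Int) 1).foldl
      (fun acc j => pvStep g key acc
        (PySem.List.pyGetD (PySem.List.sorted input (fun d => pvKeyVal key d) false) j [])) [] = _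
  exact PySem.List.foldl_pyRange_zero_pyGetD' _ _ _ _

-- consecutive pairs of (l ++ [a])
lemma pvZipSnoc (l : List Int) (h : l ≠ []) (a : Int) :
    (l ++ [a]).zip ((l ++ [a]).tail) = l.zip l.tail ++ [(l.getLast h, a)] := by
  induction l with
  | nil => exact absurd rfl h
  | cons x t ih =>
    cases t with
    | nil => simp
    | cons y t' =>
      have ih' := ih (List.cons_ne_nil y t')
      simp only [List.cons_append, List.tail_cons, List.zip_cons_cons] at *
      rw [ih', List.getLast_cons (List.cons_ne_nil y t')]

lemma pvGetD_append_lt {α : Type} (xs : List α) (y : α) (i : Int) (d : α)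
    (h0 : 0 ≤ i) (h1 : i < xs.length) :
    PySem.List.pyGetD (xs ++ [y]) i d = PySem.List.pyGetD xs i d := by
  rw [PySem.List.pyGetD_eq_getElem _ d h0 (by simp; omega),
      PySem.List.pyGetD_eq_getElem _ d h0 h1]
  exact List.getElem_append_left (by omega)

lemma pvBreaks_snoc (g : Int) (key : String) (zs : List (List (String × Int))) (h : zs ≠ [])
    (e : List (String × Int)) :
    pvBreaks g key (zs ++ [e]) = pvBreaks g key zs ++
      (if |pvKeyVal key (zs.getLast h) - pvKeyVal key e| ≥ g then [(zs.length : Int)] else []) := by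
  obtain ⟨m, hm⟩ : ∃ m, zs.length = m + 1 := by
    cases zs with
    | nil => exact absurd rfl h
    | cons a t => exact ⟨t.length, by simp⟩
  unfold pvBreaks
  have hlen : ((zs ++ [e]).length : Int) - 1 = (m : Int) + 1 := by
    simp [hm]
  have hlen2 : ((zs.length : Int)) - 1 = (m : Int) := by rw [hm]; push_cast; ring
  rw [hlen, hlen2, PySem.List.pyRange_one_succ_right (by positivity), List.filter_append,
    List.map_append]
  congr 1
  · congr 1
    apply List.filter_congr
    intro i hi
    obtain ⟨hi0, hi1⟩ := PySem.List.mem_pyRange_one.mp hi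
    rw [pvGetD_append_lt zs e i [] hi0 (by omega), pvGetD_append_lt zs e (i + 1) [] (by omega) (by omega)]
  · have hg1 : PySem.List.pyGetD (zs ++ [e]) (m : Int) [] = zs.getLast h := by
      rw [PySem.List.pyGetD_eq_getElem _ [] (by positivity) (by simp [hm]),
        List.getElem_append_left (by omega), List.getLast_eq_getElem]
      simp [hm]
    have hg2 : PySem.List.pyGetD (zs ++ [e]) ((m : Int) + 1) [] = e := by
      rw [PySem.List.pyGetD_eq_getElem _ [] (by positivity) (by simp [hm])]
      have : ((m : Int) + 1).toNat = zs.length := by omega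
      simp [this]
    rw [List.filter_singleton, hg1, hg2]
    by_cases hcond : |pvKeyVal key (zs.getLast h) - pvKeyVal key e| ≥ g
    · rw [if_pos hcond]
      simp only [decide_eq_true hcond, cond_true, List.map_cons, List.map_nil]
      congr 1
      omega
    · rw [if_neg hcond]
      simp [hcond]

lemma pvBreaks_mem (g : Int) (key : String) (ys : List (List (String × Int))) (b : Int)
    (hb : b ∈ pvBreaks g key ys) : 1 ≤ b ∧ b ≤ (ys.length : Int) - 1 := by
  unfold pvBreaks at hb
  simp only [List.mem_map, List.mem_filter] at hb
  obtain ⟨i, ⟨hi, _⟩, rfl⟩ := hb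
  have := PySem.List.mem_pyRange_one.mp hi
  omega

lemma pvSlice_append {α : Type} (zs : List α) (e : α) (a b : Int)
    (h0 : 0 ≤ a) (h1 : 0 ≤ b) (ha : a ≤ (zs.length : Int)) (hb : b ≤ (zs.length : Int)) :
    PySem.List.slice (zs ++ [e]) (some a) (some b) = PySem.List.slice zs (some a) (some b) := by
  rw [PySem.List.slice_toNat _ h0 h1, PySem.List.slice_toNat _ h0 h1,
    List.drop_append_of_le_length (by omega),
    List.take_append_of_le_length (by simp; omega)]

lemma pvSlice_drop {α : Type} (zs : List α) (a : Int) (h0 : 0 ≤ a) (ha : a ≤ (zs.length : Int)) :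
    PySem.List.slice zs (some a) (some (zs.length : Int)) = zs.drop a.toNat := by
  rw [PySem.List.slice_toNat _ h0 (by positivity)]
  apply List.take_of_length_le
  simp only [List.length_drop]
  omega

lemma pvSlice_snoc_full {α : Type} (zs : List α) (e : α) (a : Int)
    (h0 : 0 ≤ a) (ha : a ≤ (zs.length : Int)) :
    PySem.List.slice (zs ++ [e]) (some a) (some ((zs.length : Int) + 1)) = zs.drop a.toNat ++ [e] := by
  rw [PySem.List.slice_toNat _ h0 (by positivity),
    List.drop_append_of_le_length (by omega)]
  apply List.take_of_length_le
  simp only [List.length_append, List.length_drop, List.length_cons, List.length_nil]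
  omega

lemma pvSlice_last {α : Type} (zs : List α) (e : α) :
    PySem.List.slice (zs ++ [e]) (some (zs.length : Int)) (some ((zs.length : Int) + 1)) = [e] := by
  rw [PySem.List.slice_toNat _ (by positivity) (by positivity)]
  have h1 : ((zs.length : Int)).toNat = zs.length := by omega
  have h2 : ((zs.length : Int) + 1).toNat = zs.length + 1 := by omega
  rw [h1, h2]
  simp

lemma pvBoundsL_mem (g : Int) (key : String) (zs : List (List (String × Int))) (h : zs ≠ [])
    (x : Int) (hx : x ∈ (0 : Int) :: pvBreaks g key zs) : 0 ≤ x ∧ x ≤ (zs.length : Int) - 1 := by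
  have hlpos : 0 < zs.length := List.length_pos_of_ne_nil h
  rcases List.mem_cons.mp hx with rfl | hx
  · constructor <;> omega
  · have := pvBreaks_mem g key zs x hx
    constructor <;> omega

lemma pvMain (g : Int) (key : String) (ys : List (List (String × Int))) :
    ys.foldl (pvStep g key) [] = pvCore g key ys := by
  induction ys using List.reverseRecOn with
  | nil => simp [pvCore]
  | append_singleton zs e ih =>
    rw [List.foldl_append, List.foldl_cons, List.foldl_nil, ih]
    by_cases hz : zs = []
    · subst hz
      norm_num [pvCore, pvStep, pvBounds, pvBreaks, PySem.List.pyRange_one_eq_nil,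
        PySem.List.slice_from_one, PySem.List.slice_toNat]
    · have hlpos : 0 < zs.length := List.length_pos_of_ne_nil hz
      have hlne : ((0 : Int) :: pvBreaks g key zs) ≠ [] := List.cons_ne_nil _ _
      set l : List Int := (0 : Int) :: pvBreaks g key zs with hl
      set lg : Int := l.getLast hlne with hlgdef
      have hmeml : ∀ x ∈ l, 0 ≤ x ∧ x ≤ (zs.length : Int) - 1 := pvBoundsL_mem g key zs hz
      have hlgB : 0 ≤ lg ∧ lg ≤ (zs.length : Int) - 1 := hmeml _ (List.getLast_mem hlne)
      have hbounds : pvBounds g key zs = l ++ [(zs.length : Int)] := by simp [pvBounds, hl]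
      have hLne : zs.drop lg.toNat ≠ [] := by
        apply List.ne_nil_of_length_pos
        simp only [List.length_drop]
        omega
      have hcore : pvCore g key zs =
          (l.zip l.tail).map (fun p => PySem.List.slice zs (some p.1) (some p.2)) ++
            [zs.drop lg.toNat] := by
        unfold pvCore
        rw [if_neg hz, PySem.List.slice_from_one, hbounds, pvZipSnoc _ hlne, List.map_append]
        simp only [List.map_cons, List.map_nil]
        rw [pvSlice_drop zs lg hlgB.1 (by omega)]
      have hcorene : pvCore g key zs ≠ [] := by rw [hcore]; simp
      have hlastlast : PySem.List.pyGetD (PySem.List.pyGetD (pvCore g key zs) (-1) []) (-1) []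
          = zs.getLast hz := by
        rw [hcore, PySem.List.pyGetD_neg_one_append_singleton,
          PySem.List.pyGetD_neg_one _ _ hLne, List.getLast_drop]
      have hlen1 : ((zs ++ [e]).length : Int) = (zs.length : Int) + 1 := by simp
      have hmapfirst :
          (l.zip l.tail).map (fun p => PySem.List.slice (zs ++ [e]) (some p.1) (some p.2)) =
          (l.zip l.tail).map (fun p => PySem.List.slice zs (some p.1) (some p.2)) := by
        apply List.map_congr_left
        intro p hp
        obtain ⟨h1, h2⟩ := List.of_mem_zip (a := p.1) (b := p.2) (by simpa using hp)
        have b1 := hmeml _ h1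
        have b2 := hmeml _ (List.mem_of_mem_tail h2)
        exact pvSlice_append zs e p.1 p.2 b1.1 b2.1 (by omega) (by omega)
      have hz' : zs ++ [e] ≠ [] := by
        intro hc
        have := congrArg List.length hc
        simp at this
      unfold pvStep
      rw [if_pos hcorene, hlastlast]
      by_cases hgap : |pvKeyVal key (zs.getLast hz) - pvKeyVal key e| < g
      · -- no gap: the last group is extended with e
        rw [if_pos hgap]
        have hb' : pvBounds g key (zs ++ [e]) = l ++ [(zs.length : Int) + 1] := by
          simp only [pvBounds, pvBreaks_snoc g key zs hz e, if_neg (not_le.mpr hgap), hlen1, hl]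
          simp
        have hcore' : pvCore g key (zs ++ [e]) =
            (l.zip l.tail).map (fun p => PySem.List.slice (zs ++ [e]) (some p.1) (some p.2)) ++
              [PySem.List.slice (zs ++ [e]) (some lg) (some ((zs.length : Int) + 1))] := by
          unfold pvCore
          rw [if_neg hz', PySem.List.slice_from_one, hb', pvZipSnoc _ hlne, List.map_append]
          simp only [List.map_cons, List.map_nil]
          rw [← hlgdef]
        rw [hcore', hmapfirst, pvSlice_snoc_full zs e lg hlgB.1 (by omega), hcore,
          PySem.List.pyGetD_neg_one_append_singleton, List.dropLast_concat]
      · -- gap: a new singleton group [e] is opened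
        rw [if_neg hgap]
        have hb' : pvBounds g key (zs ++ [e]) =
            (l ++ [(zs.length : Int)]) ++ [(zs.length : Int) + 1] := by
          simp only [pvBounds, pvBreaks_snoc g key zs hz e, if_pos (not_lt.mp hgap), hlen1, hl]
          simp
        have hcore' : pvCore g key (zs ++ [e]) =
            ((l.zip l.tail).map (fun p => PySem.List.slice (zs ++ [e]) (some p.1) (some p.2)) ++
              [PySem.List.slice (zs ++ [e]) (some lg) (some (zs.length : Int))]) ++
              [PySem.List.slice (zs ++ [e]) (some (zs.length : Int))
                (some ((zs.length : Int) + 1))] := by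
          unfold pvCore
          rw [if_neg hz', PySem.List.slice_from_one, hb', pvZipSnoc _ (by simp),
            List.getLast_concat, pvZipSnoc _ hlne, List.map_append, List.map_append]
          simp only [List.map_cons, List.map_nil]
          rw [← hlgdef]
        rw [hcore', hmapfirst, pvSlice_last zs e,
          pvSlice_append zs e lg (zs.length : Int) hlgB.1 (by positivity) (by omega) le_rfl,
          pvSlice_drop zs lg hlgB.1 (by omega), hcore]

-- ===== VERDICT (by name: the statement is the Claim_ definition above) =====
theorem split_dict_at_gaps_spec : Claim_equal_split_dict_at_gaps := by
  intro input g key _ _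
  unfold Spec_split_dict_at_gaps
  rw [pvAlt_eq_core, pvA_eq_foldl, pvMain]
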